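-- pv_equiv track=rewrite | github.com/prempyla/collabrate- | score_good_pair.py | findScoreSum
-- ===== SOURCE A (Python) =====
-- def findScoreSum(nums):
--     n=len(nums)
--     total = 0
--     for i in range(n):
--         for j in range(i,n):
--             if i < j and nums[i]==nums[j]:
--                 total+=(j-i)
--     return total
-- ===== SOURCE B (Python) =====
-- def findScoreSum(nums):
--     total = 0
--     stats = {}  # value -> (count of earlier occurrences, sum of their indices)
--     for j, v in enumerate(nums):
--         cnt, s = stats.get(v, (0, 0))
--         total += cnt * j - s
--         stats[v] = (cnt + 1, s + j)
--     return total
-- ===== Notes on version B (the rewrite author's own statement) =====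
-- stated objective: faster
-- what changed: Replaced the quadratic all-pairs double loop by a single pass keeping, per value, a running count and index-sum, so each element contributes count*j - sum_of_previous_indices.
import Mathlib
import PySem

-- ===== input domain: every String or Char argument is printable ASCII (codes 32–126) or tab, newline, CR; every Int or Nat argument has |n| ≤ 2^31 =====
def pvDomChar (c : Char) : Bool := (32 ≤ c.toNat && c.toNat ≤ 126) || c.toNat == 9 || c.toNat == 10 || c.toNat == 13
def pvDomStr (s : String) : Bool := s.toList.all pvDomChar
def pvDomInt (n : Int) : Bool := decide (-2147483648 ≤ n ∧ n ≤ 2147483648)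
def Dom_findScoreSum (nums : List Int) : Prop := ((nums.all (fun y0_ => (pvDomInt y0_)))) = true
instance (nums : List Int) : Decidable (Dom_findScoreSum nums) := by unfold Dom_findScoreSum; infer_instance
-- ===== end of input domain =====

-- B replaces A's quadratic all-pairs double loop by one pass keeping, per value, a running
-- count and index-sum (position j contributes count*j - sum of earlier indices of the same value).

-- ===== PORT A =====
def findScoreSum (nums : List Int) : Int :=
  let n : Int := PySem.List.len nums
  (PySem.List.pyRange 0 n).foldl (fun total i =>
    (PySem.List.pyRange i n).foldl (fun total j =>
      if i < j ∧ PySem.List.pyGet? nums i = PySem.List.pyGet? nums j then total + (j - i) else total) total) 0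

-- ===== PORT B =====
def findScoreSum_alt (nums : List Int) : Int :=
  ((PySem.List.enumerate nums).foldl
    (fun (st : Int × PySem.Dict Int (Int × Int)) (p : Int × Int) =>
      let cs := st.2.getD p.2 (0, 0)
      (st.1 + (cs.1 * p.1 - cs.2), st.2.insert p.2 (cs.1 + 1, cs.2 + p.1)))
    (0, PySem.Dict.empty)).1

-- ===== PRECONDITION & SPEC =====
def Spec_findScoreSum (nums : List Int) (out : Int) : Prop := out = findScoreSum_alt nums
instance (nums : List Int) (out : Int) : Decidable (Spec_findScoreSum nums out) := by unfold Spec_findScoreSum; infer_instance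

-- ===== CLAIM (what is proved, stated in full; the proofs are below) =====
def Claim_equal_findScoreSum : Prop := ∀ (nums : List Int), Dom_findScoreSum nums → Spec_findScoreSum nums (findScoreSum nums)

-- ===== LEMMAS AND PROOFS =====

-- count of v in xs, as an Int
def cntI (v : Int) : List Int → Int
  | [] => 0
  | a :: t => (if a = v then 1 else 0) + cntI v t

-- sum of the indices (starting at k) of the occurrences of v in xs
def sumI (v : Int) (k : Int) : List Int → Int
  | [] => 0
  | a :: t => (if a = v then k else 0) + sumI v (k + 1) t

-- abstract state of B's loop: c w / s w = count and index-sum recorded so far for value w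
def gscore (c s : Int → Int) (k : Int) : List Int → Int
  | [] => 0
  | a :: t => (c a * k - s a) +
      gscore (fun w => if w = a then c a + 1 else c w)
             (fun w => if w = a then s a + k else s w) (k + 1) t

-- B's fold computes gscore of the remaining list, given that the dict realises (c, s)
lemma gscore_fold (l : List Int) : ∀ (k t : Int) (d : PySem.Dict Int (Int × Int))
    (c s : Int → Int), (∀ w, d.getD w (0, 0) = (c w, s w)) →
    ((PySem.List.enumerate l k).foldl
      (fun (st : Int × PySem.Dict Int (Int × Int)) (p : Int × Int) =>
        let cs := st.2.getD p.2 (0, 0)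
        (st.1 + (cs.1 * p.1 - cs.2), st.2.insert p.2 (cs.1 + 1, cs.2 + p.1)))
      (t, d)).1 = t + gscore c s k l := by
  induction l with
  | nil => intro k t d c s h; simp [PySem.List.enumerate_nil, gscore]
  | cons a rest ih =>
      intro k t d c s h
      rw [PySem.List.enumerate_cons, List.foldl_cons]
      simp only [h a]
      rw [ih (k + 1) (t + (c a * k - s a)) _
          (fun w => if w = a then c a + 1 else c w)
          (fun w => if w = a then s a + k else s w)
          (by
            intro w
            rw [PySem.Dict.getD_insert]
            by_cases hw : w = a
            · simp [hw]
            · simp [hw, h w])]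
      simp [gscore]
      ring

-- gscore over a right append
lemma gscore_append (xs : List Int) : ∀ (c s : Int → Int) (k v : Int),
    gscore c s k (xs ++ [v]) =
      gscore c s k xs + ((c v + cntI v xs) * (k + xs.length) - (s v + sumI v k xs)) := by
  induction xs with
  | nil => intro c s k v; simp [gscore, cntI, sumI]
  | cons a t ih =>
      intro c s k v
      simp only [List.cons_append, gscore, cntI, sumI, ih, List.length_cons]
      by_cases h : a = v
      · subst h; simp; ring
      · simp [h, Ne.symm h]; ring

-- indexed ite-sum over enumerate, in terms of cntI / sumI
lemma enumSum (v n : Int) (xs : List Int) : ∀ (k : Int),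
    ((PySem.List.enumerate xs k).map (fun p => if p.2 = v then n - p.1 else 0)).sum
      = cntI v xs * n - sumI v k xs := by
  induction xs with
  | nil => intro k; simp [PySem.List.enumerate_nil, cntI, sumI]
  | cons a t ih =>
      intro k
      rw [PySem.List.enumerate_cons]
      simp only [List.map_cons, List.sum_cons, ih, cntI, sumI]
      by_cases h : a = v
      · subst h; simp; ring
      · simp [h]

-- an 'if p then acc + f else acc' loop is an ite-sum
lemma foldl_guard_add {α : Type} (p : α → Prop) [DecidablePred p] (f : α → Int)
    (l : List α) : ∀ (a : Int),
    l.foldl (fun t x => if p x then t + f x else t) a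
      = a + (l.map (fun x => if p x then f x else 0)).sum := by
  induction l with
  | nil => intro a; simp
  | cons x t ih =>
      intro a
      by_cases h : p x
      · simp [h, ih]; ring
      · simp [h, ih]

-- A's double fold as a sum of sums
lemma A_as_sum (nums : List Int) :
    findScoreSum nums =
      ((PySem.List.pyRange 0 (PySem.List.len nums)).map (fun i =>
        ((PySem.List.pyRange i (PySem.List.len nums)).map (fun j =>
          if i < j ∧ PySem.List.pyGet? nums i = PySem.List.pyGet? nums j then j - i else 0)).sum)).sum := by
  show (PySem.List.pyRange 0 (PySem.List.len nums)).foldl _ 0 = _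
  rw [PySem.List.foldl_congr_mem _ _ (fun total i => total +
        ((PySem.List.pyRange i (PySem.List.len nums)).map (fun j =>
          if i < j ∧ PySem.List.pyGet? nums i = PySem.List.pyGet? nums j then j - i else 0)).sum) _
      (fun acc i _ => foldl_guard_add _ _ _ acc)]
  rw [PySem.List.foldl_add]
  simp

lemma pg_left (xs : List Int) (v i : Int) (h0 : 0 ≤ i) (h1 : i < (xs.length : Int)) :
    PySem.List.pyGet? (xs ++ [v]) i = PySem.List.pyGet? xs i := by
  obtain ⟨n, rfl⟩ : ∃ n : Nat, i = (n : Int) := ⟨i.toNat, (Int.toNat_of_nonneg h0).symm⟩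
  rw [PySem.List.pyGet?_natCast, PySem.List.pyGet?_natCast,
      List.getElem?_append_left (by exact_mod_cast h1)]

lemma pg_last (xs : List Int) (v : Int) :
    PySem.List.pyGet? (xs ++ [v]) (xs.length : Int) = some v := by
  simp [PySem.List.pyGet?, PySem.List.pyIdx?]

lemma pyRange_self (n : Int) : PySem.List.pyRange n n = [] := by
  have : ∀ x, x ∉ PySem.List.pyRange n n := by
    intro x hx
    have := PySem.List.mem_pyRange_one.mp hx
    omega
  exact List.eq_nil_iff_forall_not_mem.mpr this

-- A over a right append
lemma A_append (xs : List Int) (v : Int) :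
    findScoreSum (xs ++ [v]) =
      findScoreSum xs + (cntI v xs * xs.length - sumI v 0 xs) := by
  rw [A_as_sum, A_as_sum]
  have hlen : PySem.List.len (xs ++ [v]) = (xs.length : Int) + 1 := by
    simp [PySem.List.len]
  have hlen' : PySem.List.len xs = (xs.length : Int) := by simp [PySem.List.len]
  set n : Int := (xs.length : Int) with hn
  have hn0 : (0:Int) ≤ n := by positivity
  rw [hlen, hlen', PySem.List.pyRange_one_succ_right hn0, List.map_append, List.sum_append]
  -- the added outer iteration (i = n) contributes 0
  have hlast : (List.map (fun i =>
      ((PySem.List.pyRange i (n+1)).map (fun j =>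
        if i < j ∧ PySem.List.pyGet? (xs ++ [v]) i = PySem.List.pyGet? (xs ++ [v]) j
        then j - i else 0)).sum) [n]).sum = 0 := by
    simp only [List.map_singleton, List.sum_singleton]
    rw [PySem.List.pyRange_one_succ_right (le_refl n), pyRange_self]
    simp
  rw [hlast, add_zero]
  -- on the old range each inner sum gains exactly the j = n term
  rw [List.map_congr_left (f := fun i =>
      ((PySem.List.pyRange i (n+1)).map (fun j =>
        if i < j ∧ PySem.List.pyGet? (xs ++ [v]) i = PySem.List.pyGet? (xs ++ [v]) j
        then j - i else 0)).sum)
      (g := fun i =>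
      ((PySem.List.pyRange i n).map (fun j =>
        if i < j ∧ PySem.List.pyGet? xs i = PySem.List.pyGet? xs j
        then j - i else 0)).sum
      + (if PySem.List.pyGet? xs i = some v then n - i else 0))
      (by
        intro i hi
        beta_reduce
        obtain ⟨hi0, hin⟩ := PySem.List.mem_pyRange_one.mp hi
        rw [PySem.List.pyRange_one_succ_right (le_of_lt hin), List.map_append, List.sum_append]
        congr 1
        · apply congrArg
          apply List.map_congr_left
          intro j hj
          obtain ⟨hji, hjn⟩ := PySem.List.mem_pyRange_one.mp hj
          rw [pg_left xs v i hi0 hin, pg_left xs v j (le_trans hi0 hji) hjn]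
        · rw [List.map_singleton, List.sum_singleton, pg_left xs v i hi0 hin, pg_last]
          simp [hin])]
  rw [PySem.List.sum_map_add_int]
  congr 1
  -- the extra column equals cnt*n - sumI, via enumerate
  have hconv : List.map (fun i => (if PySem.List.pyGet? xs i = some v then n - i else 0))
      (PySem.List.pyRange 0 n)
      = List.map ((fun p : Int × Int => if p.2 = v then n - p.1 else 0) ∘
          (fun j => (j, PySem.List.pyGetD xs j 0))) (PySem.List.pyRange 0 n) := by
    apply List.map_congr_left
    intro i hi
    obtain ⟨hi0, hin⟩ := PySem.List.mem_pyRange_one.mp hi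
    have h1 : PySem.List.pyGetD xs i 0 = xs[i.toNat] :=
      PySem.List.pyGetD_eq_getElem xs 0 hi0 hin
    have h2 : PySem.List.pyGet? xs i = some xs[i.toNat] := by
      obtain ⟨m, rfl⟩ : ∃ m : Nat, i = (m : Int) := ⟨i.toNat, (Int.toNat_of_nonneg hi0).symm⟩
      rw [PySem.List.pyGet?_natCast]
      exact List.getElem?_eq_getElem (by rw [hn] at hin; exact_mod_cast hin)
    simp [h1, h2]
  rw [hconv, ← List.map_map, ← hlen', ← PySem.List.enumerate_eq_map_pyRange xs 0, enumSum, hlen']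

lemma B_eq_gscore (nums : List Int) :
    findScoreSum_alt nums = gscore (fun _ => 0) (fun _ => 0) 0 nums := by
  unfold findScoreSum_alt
  rw [gscore_fold nums 0 0 PySem.Dict.empty (fun _ => 0) (fun _ => 0)
      (fun w => PySem.Dict.getD_empty w (0, 0))]
  ring

lemma A_eq_gscore (nums : List Int) :
    findScoreSum nums = gscore (fun _ => 0) (fun _ => 0) 0 nums := by
  induction nums using List.reverseRecOn with
  | nil => simp [findScoreSum, gscore, PySem.List.len, PySem.List.pyRange]
  | append_singleton xs v ih =>
      rw [A_append, gscore_append, ih]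
      ring

-- ===== VERDICT (by name: the statement is the Claim_ definition above) =====
theorem findScoreSum_spec : Claim_equal_findScoreSum := by
  intro nums _
  show findScoreSum nums = findScoreSum_alt nums
  rw [B_eq_gscore, A_eq_gscore]
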